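-- pv_equiv track=rewrite | github.com/aillear/AllOrNothing | 打表部分/check.py | is_double_double
-- ===== SOURCE A (Python) =====
-- def is_double_double(arr):
--     list = sorted(arr)
--     if len(list)<4:
--         return 0
--     count_1 = 1
--     count_2 = 0
--     for i in range(1,len(list)):
--         if list[i] == list[i-1]:
--             count_1 = count_1 + 1
--         else:
--             count_1 = 1
--         if count_1 == 2:
--             count_2 = count_2 + 1
--
--     if count_2 >= 2:
--         return 1
--     return 0
-- ===== SOURCE B (Python) =====
-- def is_double_double(arr):
--     seen = set()
--     dup = set()
--     for x in arr:
--         if x in seen: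
--             dup.add(x)
--             if len(dup) >= 2:
--                 return 1
--         else:
--             seen.add(x)
--     return 0
-- ===== Notes on version B (the rewrite author's own statement) =====
-- stated objective: faster
-- what changed: Replaces sort + indexed run-length scan with one forward pass over two hash sets (seen/dup) with an early exit once two duplicated values are found; the len<4 guard disappears.
import Mathlib
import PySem

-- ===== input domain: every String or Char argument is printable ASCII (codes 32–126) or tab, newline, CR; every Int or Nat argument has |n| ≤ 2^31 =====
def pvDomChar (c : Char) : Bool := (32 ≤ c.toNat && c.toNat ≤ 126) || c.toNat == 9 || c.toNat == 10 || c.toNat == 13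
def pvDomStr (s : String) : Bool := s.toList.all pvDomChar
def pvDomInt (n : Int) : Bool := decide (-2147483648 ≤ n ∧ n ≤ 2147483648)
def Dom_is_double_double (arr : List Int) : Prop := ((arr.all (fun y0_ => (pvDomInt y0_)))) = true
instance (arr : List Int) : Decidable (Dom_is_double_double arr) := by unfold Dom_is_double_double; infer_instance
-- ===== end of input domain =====

-- B replaces A's sort + indexed run-length scan by a single forward pass over two sets
-- (seen/dup) with an early exit once two duplicated values are found (objective: simpler).

-- ===== PORT A =====
-- loop body of A's `for i in range(1, len(list))`
def aStep (lst : List Int) (st : Int × Int) (i : Int) : Int × Int :=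
  let c1 := if PySem.List.pyGetD lst i 0 = PySem.List.pyGetD lst (i - 1) 0 then st.1 + 1 else 1
  let c2 := if c1 = 2 then st.2 + 1 else st.2
  (c1, c2)

def is_double_double (arr : List Int) : Int :=
  let lst := PySem.List.sorted arr (fun x => x)
  if (lst.length : Int) < 4 then 0
  else if 2 ≤ ((PySem.List.pyRange 1 (lst.length : Int) 1).foldl (aStep lst) (1, 0)).2 then 1
  else 0

-- ===== PORT B =====
-- B's loop: `seen`/`dup` are Python sets, early return once len(dup) >= 2
def altLoop : List Int → PySem.Set Int → PySem.Set Int → Int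
  | [], _, _ => 0
  | x :: rest, seen, dup =>
    if x ∈ seen then
      let dup' := PySem.Set.add dup x
      if 2 ≤ dup'.length then 1 else altLoop rest seen dup'
    else altLoop rest (PySem.Set.add seen x) dup

def is_double_double_alt (arr : List Int) : Int :=
  altLoop arr PySem.Set.empty PySem.Set.empty

-- ===== PRECONDITION & SPEC =====
def Spec_is_double_double (arr : List Int) (out : Int) : Prop := out = is_double_double_alt arr
instance (arr : List Int) (out : Int) : Decidable (Spec_is_double_double arr out) := by unfold Spec_is_double_double; infer_instance

-- ===== CLAIM (what is proved, stated in full; the proofs are below) =====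
def Claim_equal_is_double_double : Prop := ∀ (arr : List Int), Dom_is_double_double arr → Spec_is_double_double arr (is_double_double arr)

-- ===== LEMMAS AND PROOFS =====

-- number of distinct values occurring at least twice
def g (l : List Int) : Nat := (l.toFinset.filter (fun x => 2 ≤ l.count x)).card

-- A's loop, rephrased as a structural scan over the tail of the sorted list
def scanRun (prev c1 c2 : Int) : List Int → Int × Int
  | [] => (c1, c2)
  | x :: rest =>
    scanRun x (if x = prev then c1 + 1 else 1)
      (if (if x = prev then c1 + 1 else 1) = 2 then c2 + 1 else c2) rest

lemma scanRun_cons (prev c1 c2 x : Int) (rest : List Int) :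
    scanRun prev c1 c2 (x :: rest) =
      scanRun x (if x = prev then c1 + 1 else 1)
        (if (if x = prev then c1 + 1 else 1) = 2 then c2 + 1 else c2) rest := rfl

-- B's loop without the early exit: the dup set it would build
def finalDup : List Int → PySem.Set Int → PySem.Set Int → PySem.Set Int
  | [], _, dup => dup
  | x :: rest, seen, dup =>
    if x ∈ seen then finalDup rest seen (PySem.Set.add dup x)
    else finalDup rest (PySem.Set.add seen x) dup

lemma g_nil : g [] = 0 := by simp [g]

lemma cnt_ne {c b : Int} (l : List Int) (h : b ≠ c) :
    List.count c (b :: l) = List.count c l := by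
  simp [h]

lemma g_cons_not_mem {a : Int} {l : List Int} (h : a ∉ l) : g (a :: l) = g l := by
  unfold g
  have hc : l.count a = 0 := List.count_eq_zero_of_not_mem h
  rw [List.toFinset_cons, Finset.filter_insert, if_neg (by simp [hc])]
  congr 1
  apply Finset.filter_congr
  intro x hx
  have hxl : x ∈ l := List.mem_toFinset.mp hx
  have hne : a ≠ x := fun e => h (e ▸ hxl)
  simp [hne]

lemma g_perm {l l' : List Int} (h : l.Perm l') : g l = g l' := by
  unfold g
  have hf : l.toFinset = l'.toFinset := by ext y; simp [h.mem_iff]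
  rw [hf]
  congr 1
  apply Finset.filter_congr
  intro x _
  simp [h.count_eq]

lemma count_two_le (x y : Int) (hxy : x ≠ y) : ∀ l : List Int, l.count x + l.count y ≤ l.length
  | [] => by simp
  | a :: l => by
    have ih := count_two_le x y hxy l
    by_cases hax : a = x
    · by_cases hay : a = y
      · exact absurd (hax.symm.trans hay) hxy
      · subst hax
        rw [List.count_cons_self, cnt_ne l hay]
        simp only [List.length_cons]
        omega
    · by_cases hay : a = y
      · subst hay
        rw [List.count_cons_self, cnt_ne l hax]
        simp only [List.length_cons]
        omega
      · rw [cnt_ne l hax, cnt_ne l hay]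
        simp only [List.length_cons]
        omega

lemma g_two_length {l : List Int} (h2 : 2 ≤ g l) : 4 ≤ l.length := by
  unfold g at h2
  obtain ⟨a, ha, b, hb, hab⟩ := Finset.one_lt_card.mp (lt_of_lt_of_le one_lt_two h2)
  rw [Finset.mem_filter] at ha hb
  have hcl := count_two_le a b hab l
  omega

lemma dropWhile_gt (prev : Int) : ∀ l : List Int, (prev :: l).Pairwise (· ≤ ·) →
    ∀ y ∈ l.dropWhile (· == prev), prev < y
  | [], _, y, hy => by simp at hy
  | a :: l, hp, y, hy => by
    rw [List.pairwise_cons] at hp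
    obtain ⟨hle, hpl⟩ := hp
    by_cases ha : a = prev
    · subst ha
      rw [List.dropWhile_cons_of_pos (by simp)] at hy
      refine dropWhile_gt a l (List.Pairwise.cons ?_ (List.pairwise_cons.mp hpl).2) y hy
      intro y' hy'
      exact hle y' (List.mem_cons_of_mem _ hy')
    · rw [List.dropWhile_cons_of_neg (by simp [ha])] at hy
      have hpa : prev < a := lt_of_le_of_ne (hle a (by simp)) (Ne.symm ha)
      rcases List.mem_cons.mp hy with rfl | hyl
      · exact hpa
      · exact lt_of_lt_of_le hpa ((List.pairwise_cons.mp hpl).1 y hyl)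

lemma G2 (prev : Int) (l : List Int) (hp : (prev :: l).Pairwise (· ≤ ·)) :
    g (prev :: prev :: l) = 1 + g (l.dropWhile (· == prev)) := by
  have hwgt : ∀ y ∈ l.dropWhile (· == prev), prev < y := dropWhile_gt prev l hp
  have htake : ∀ y ∈ l.takeWhile (· == prev), y = prev := by
    intro y hy
    have := List.mem_takeWhile_imp hy
    simpa using this
  have hsplit : l.takeWhile (· == prev) ++ l.dropWhile (· == prev) = l :=
    List.takeWhile_append_dropWhile
  have hcount : ∀ y : Int, y ≠ prev →
      (prev :: prev :: l).count y = (l.dropWhile (· == prev)).count y := by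
    intro y hy
    have h0 : (l.takeWhile (· == prev)).count y = 0 :=
      List.count_eq_zero_of_not_mem (fun hmem => hy (htake y hmem))
    calc (prev :: prev :: l).count y = l.count y := by
          rw [cnt_ne _ (Ne.symm hy), cnt_ne _ (Ne.symm hy)]
      _ = (l.takeWhile (· == prev) ++ l.dropWhile (· == prev)).count y := by rw [hsplit]
      _ = (l.dropWhile (· == prev)).count y := by rw [List.count_append, h0, Nat.zero_add]
  have hfin : (prev :: prev :: l).toFinset = insert prev (l.dropWhile (· == prev)).toFinset := by
    ext y
    simp only [List.toFinset_cons, Finset.mem_insert, List.mem_toFinset]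
    constructor
    · rintro (rfl | rfl | hyl)
      · exact Or.inl rfl
      · exact Or.inl rfl
      · rw [← hsplit] at hyl
        rcases List.mem_append.mp hyl with h | h
        · exact Or.inl (htake y h)
        · exact Or.inr h
    · rintro (rfl | hyw)
      · exact Or.inl rfl
      · refine Or.inr (Or.inr ?_)
        rw [← hsplit]
        exact List.mem_append.mpr (Or.inr hyw)
  unfold g
  rw [hfin, Finset.filter_insert,
    if_pos (by rw [List.count_cons_self, List.count_cons_self]; omega)]
  rw [Finset.card_insert_of_notMem (by
    simp only [Finset.mem_filter, List.mem_toFinset]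
    rintro ⟨hmem, -⟩
    exact absurd (hwgt prev hmem) (lt_irrefl _))]
  have hfc : Finset.filter (fun x => 2 ≤ (prev :: prev :: l).count x)
        (l.dropWhile (· == prev)).toFinset
      = Finset.filter (fun x => 2 ≤ (l.dropWhile (· == prev)).count x)
        (l.dropWhile (· == prev)).toFinset := by
    apply Finset.filter_congr
    intro y hy
    have hyp : y ≠ prev := by
      intro e
      subst e
      exact absurd (hwgt _ (List.mem_toFinset.mp hy)) (lt_irrefl _)
    rw [hcount y hyp]
  rw [hfc]
  omega

lemma scan_base (prev c1 c2 : Int) :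
    (scanRun prev c1 c2 []).2 = c2 ∧ g [prev] = 0 := by
  constructor
  · rfl
  · rw [g_cons_not_mem (by simp), g_nil]

lemma scan_main_aux : ∀ (n : Nat) (rest : List Int) (prev c1 c2 : Int),
    rest.length ≤ n → (prev :: rest).Pairwise (· ≤ ·) →
    ((c1 = 1 → (scanRun prev c1 c2 rest).2 = c2 + (g (prev :: rest) : Int)) ∧
     (2 ≤ c1 → (scanRun prev c1 c2 rest).2 = c2 + (g (rest.dropWhile (· == prev)) : Int))) := by
  intro n
  induction n with
  | zero =>
    intro rest prev c1 c2 hlen _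
    have : rest = [] := List.eq_nil_of_length_eq_zero (Nat.le_zero.mp hlen)
    subst this
    refine ⟨fun _ => ?_, fun _ => ?_⟩
    · rw [(scan_base prev c1 c2).1, (scan_base prev c1 c2).2]; ring
    · rw [(scan_base prev c1 c2).1]; simp [g_nil]
  | succ n ih =>
    intro rest prev c1 c2 hlen hp
    match rest with
    | [] =>
      refine ⟨fun _ => ?_, fun _ => ?_⟩
      · rw [(scan_base prev c1 c2).1, (scan_base prev c1 c2).2]; ring
      · rw [(scan_base prev c1 c2).1]; simp [g_nil]
    | x :: rest' =>
      rw [List.pairwise_cons] at hp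
      obtain ⟨hle, hp'⟩ := hp
      have hlen' : rest'.length ≤ n := by simp at hlen; omega
      by_cases hx : x = prev
      · subst hx
        constructor
        · intro hc1
          subst hc1
          have hstep : scanRun x 1 c2 (x :: rest') = scanRun x 2 (c2 + 1) rest' := by
            rw [scanRun_cons]; norm_num
          have haux := (ih rest' x 2 (c2 + 1) hlen' hp').2 (by norm_num)
          rw [hstep, haux, G2 x rest' hp']
          push_cast
          ring
        · intro hc1
          have hstep : scanRun x c1 c2 (x :: rest') = scanRun x (c1 + 1) c2 rest' := by
            rw [scanRun_cons, if_pos rfl, if_neg (by omega)]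
          have haux := (ih rest' x (c1 + 1) c2 hlen' hp').2 (by omega)
          rw [hstep, haux, List.dropWhile_cons_of_pos (by simp)]
      · have hlt : ∀ y ∈ x :: rest', prev < y := by
          intro y hy
          rcases List.mem_cons.mp hy with rfl | hy'
          · exact lt_of_le_of_ne (hle _ (by simp)) (Ne.symm hx)
          · exact lt_of_lt_of_le (lt_of_le_of_ne (hle x (by simp)) (Ne.symm hx))
              ((List.pairwise_cons.mp hp').1 y hy')
        have hnm : prev ∉ x :: rest' := fun hm => lt_irrefl _ (hlt prev hm)
        have hstep : scanRun prev c1 c2 (x :: rest') = scanRun x 1 c2 rest' := by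
          rw [scanRun_cons, if_neg hx]
          norm_num
        have hmain := (ih rest' x 1 c2 hlen' hp').1 rfl
        constructor
        · intro _
          rw [hstep, hmain, g_cons_not_mem hnm]
        · intro _
          rw [hstep, hmain, List.dropWhile_cons_of_neg (by simp [hx])]

lemma bridge : ∀ (t lst : List Int) (k : Nat) (prev c1 c2 : Int),
    1 ≤ k → lst.drop k = t → lst[k - 1]? = some prev →
    (PySem.List.pyRange (k : Int) (lst.length : Int) 1).foldl (aStep lst) (c1, c2) =
      scanRun prev c1 c2 t
  | [], lst, k, prev, c1, c2, _, hdrop, _ => by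
    have hlen : lst.length ≤ k := by
      by_contra hcon
      have := congrArg List.length hdrop
      simp [List.length_drop] at this
      omega
    rw [PySem.List.pyRange_one_eq_nil (by exact_mod_cast hlen)]
    rfl
  | x :: t', lst, k, prev, c1, c2, hk, hdrop, hget => by
    have hk2 : k < lst.length := by
      by_contra hcon
      rw [List.drop_eq_nil_of_le (by omega)] at hdrop
      cases hdrop
    rw [List.drop_eq_getElem_cons hk2] at hdrop
    have hxk : lst[k] = x := (List.cons.injEq _ _ _ _ ▸ hdrop).1
    have hdrop' : lst.drop (k + 1) = t' := (List.cons.injEq _ _ _ _ ▸ hdrop).2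
    have hprev : lst[k - 1] = prev := by
      have h1 : lst[k - 1]? = some lst[k - 1] := List.getElem?_eq_getElem (by omega)
      rw [h1] at hget
      exact Option.some.inj hget
    rw [PySem.List.pyRange_one_cons (by exact_mod_cast hk2), List.foldl_cons]
    have e1 : PySem.List.pyGetD lst (k : Int) 0 = x := by
      rw [PySem.List.pyGetD_eq_getElem lst 0 (by exact_mod_cast Nat.zero_le k)
        (by exact_mod_cast hk2)]
      simpa using hxk
    have e2 : (k : Int) - 1 = ((k - 1 : Nat) : Int) := by omega
    have e3 : PySem.List.pyGetD lst ((k - 1 : Nat) : Int) 0 = prev := by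
      rw [PySem.List.pyGetD_eq_getElem lst 0 (by exact_mod_cast Nat.zero_le (k - 1))
        (by exact_mod_cast (show k - 1 < lst.length by omega))]
      simpa using hprev
    have hstep : aStep lst (c1, c2) (k : Int) =
        ((if x = prev then c1 + 1 else 1),
         (if (if x = prev then c1 + 1 else 1) = 2 then c2 + 1 else c2)) := by
      simp only [aStep, e2, e1, e3]
    have hgk : lst[k]? = some x := by rw [List.getElem?_eq_getElem hk2, hxk]
    rw [hstep, scanRun_cons]
    rw [show ((k : Int) + 1) = ((k + 1 : Nat) : Int) by push_cast; ring]
    exact bridge t' lst (k + 1) x _ _ (by omega) hdrop' (by simpa using hgk)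

lemma fd_len_mono : ∀ (l : List Int) (seen dup : PySem.Set Int),
    dup.length ≤ (finalDup l seen dup).length
  | [], _, _ => le_refl _
  | x :: rest, seen, dup => by
    unfold finalDup
    split
    · refine le_trans ?_ (fd_len_mono rest seen _)
      rw [PySem.Set.add_eq_ite]
      split
      · exact le_refl _
      · simp
    · exact fd_len_mono rest _ dup

lemma alt_eq_fd : ∀ (l : List Int) (seen dup : PySem.Set Int), dup.length < 2 →
    altLoop l seen dup = if 2 ≤ (finalDup l seen dup).length then 1 else 0
  | [], seen, dup, h => by
    simp only [altLoop, finalDup]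
    rw [if_neg (by omega)]
  | x :: rest, seen, dup, h => by
    unfold altLoop finalDup
    by_cases hx : x ∈ seen
    · rw [if_pos hx, if_pos hx]
      by_cases h2 : 2 ≤ (PySem.Set.add dup x).length
      · rw [if_pos h2]
        have := fd_len_mono rest seen (PySem.Set.add dup x)
        rw [if_pos (by omega)]
      · rw [if_neg h2]
        exact alt_eq_fd rest seen _ (by omega)
    · rw [if_neg hx, if_neg hx]
      exact alt_eq_fd rest _ dup h

lemma fd_nodup : ∀ (l : List Int) (seen dup : PySem.Set Int), dup.Nodup →
    (finalDup l seen dup).Nodup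
  | [], _, _, h => h
  | x :: rest, seen, dup, h => by
    unfold finalDup
    split
    · exact fd_nodup rest seen _ (PySem.Set.nodup_add _ _ h)
    · exact fd_nodup rest _ dup h

lemma fd_mem : ∀ (l : List Int) (seen dup : PySem.Set Int) (y : Int),
    y ∈ finalDup l seen dup ↔ y ∈ dup ∨ (y ∈ l ∧ (y ∈ seen ∨ 2 ≤ l.count y))
  | [], seen, dup, y => by simp [finalDup]
  | x :: rest, seen, dup, y => by
    unfold finalDup
    by_cases hx : x ∈ seen
    · rw [if_pos hx, fd_mem rest seen _ y]
      by_cases hyx : y = x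
      · subst hyx
        constructor
        · intro _
          exact Or.inr ⟨List.mem_cons_self, Or.inl hx⟩
        · intro _
          exact Or.inl ((PySem.Set.mem_add dup y y).mpr (Or.inr rfl))
      · rw [cnt_ne rest (fun hh => hyx hh.symm), PySem.Set.mem_add]
        simp [List.mem_cons, hyx]
    · rw [if_neg hx, fd_mem rest _ dup y]
      by_cases hyx : y = x
      · subst hyx
        rw [List.count_cons_self]
        constructor
        · rintro (hd | ⟨hr, _⟩)
          · exact Or.inl hd
          · refine Or.inr ⟨List.mem_cons_self, Or.inr ?_⟩
            have h1 := List.one_le_count_iff.mpr hr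
            omega
        · rintro (hd | ⟨_, hs | hc⟩)
          · exact Or.inl hd
          · exact absurd hs hx
          · exact Or.inr ⟨List.one_le_count_iff.mp (by omega),
              Or.inl ((PySem.Set.mem_add seen y y).mpr (Or.inr rfl))⟩
      · rw [cnt_ne rest (fun hh => hyx hh.symm), PySem.Set.mem_add]
        simp [List.mem_cons, hyx]

lemma B_eq (arr : List Int) : is_double_double_alt arr = if 2 ≤ g arr then 1 else 0 := by
  unfold is_double_double_alt
  rw [alt_eq_fd arr PySem.Set.empty PySem.Set.empty (by simp [PySem.Set.empty])]
  have hnodup : (finalDup arr PySem.Set.empty PySem.Set.empty).Nodup :=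
    fd_nodup arr _ _ List.nodup_nil
  have hmem : ∀ y, y ∈ finalDup arr PySem.Set.empty PySem.Set.empty ↔
      y ∈ arr ∧ 2 ≤ arr.count y := by
    intro y
    rw [fd_mem]
    simp [PySem.Set.empty]
  have hcard : (finalDup arr PySem.Set.empty PySem.Set.empty).length = g arr := by
    rw [← List.toFinset_card_of_nodup hnodup]
    unfold g
    congr 1
    ext y
    simp only [Finset.mem_filter, List.mem_toFinset]
    exact hmem y
  rw [hcard]

lemma A_eq (arr : List Int) : is_double_double arr = if 2 ≤ g arr then 1 else 0 := by
  unfold is_double_double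
  have hperm : (PySem.List.sorted arr (fun x => x)).Perm arr :=
    PySem.List.sorted_perm arr (fun x => x) false
  have hg : g (PySem.List.sorted arr (fun x => x)) = g arr := g_perm hperm
  by_cases hlen : ((PySem.List.sorted arr (fun x => x)).length : Int) < 4
  · rw [if_pos hlen]
    have hno : ¬ 2 ≤ g arr := by
      intro h
      have h4 := g_two_length (hg ▸ h)
      omega
    rw [if_neg hno]
  · rw [if_neg hlen]
    obtain ⟨h, t, hl⟩ : ∃ h t, PySem.List.sorted arr (fun x => x) = h :: t := by
      cases hlst : PySem.List.sorted arr (fun x => x) with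
      | nil => rw [hlst] at hlen; simp at hlen
      | cons a b => exact ⟨a, b, rfl⟩
    have hpw : (h :: t).Pairwise (· ≤ ·) := by
      have hsp := PySem.List.sorted_pairwise arr (fun x => x)
      rw [hl] at hsp
      exact hsp
    have hfold : (PySem.List.pyRange 1 (((h :: t) : List Int).length : Int) 1).foldl
        (aStep (h :: t)) (1, 0) = scanRun h 1 0 t :=
      bridge t (h :: t) 1 h 1 0 (le_refl 1) (by simp) (by simp)
    have hmain := (scan_main_aux t.length t h 1 0 (le_refl _) hpw).1 rfl
    rw [hl, hfold, hmain]
    have hgt : g (h :: t) = g arr := by rw [← hl]; exact hg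
    rw [hgt]
    by_cases h2 : 2 ≤ g arr
    · rw [if_pos (by omega), if_pos h2]
    · rw [if_neg (by omega), if_neg h2]

-- ===== VERDICT (by name: the statement is the Claim_ definition above) =====
theorem is_double_double_spec : Claim_equal_is_double_double := by
  intro arr _
  unfold Spec_is_double_double
  rw [A_eq, B_eq]
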